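-- pv_equiv track=rewrite | github.com/blizzard-labs/phylo-mcmc-evaluation | src/utils/partition_files.py | create_partitions
-- ===== SOURCE A (Python) =====
-- from typing import List, Tuple, Set
--
-- def create_partitions(paired_files: List[str], num_partitions: int) -> List[List[str]]:
--     """
--     Distribute files evenly across partitions.
--
--     Args:
--         paired_files: List of base filenames
--         num_partitions: Number of partitions to create
--
--     Returns:
--         List of lists, where each inner list contains filenames for one partition
--     """
--     if num_partitions <= 0:
--         raise ValueError("Number of partitions must be positive")
--
--     if num_partitions > len(paired_files):
--         raise ValueError(f"Cannot create {num_partitions} partitions from {len(paired_files)} file pairs")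
--
--     partitions = [[] for _ in range(num_partitions)]
--
--     # Distribute files round-robin style for even distribution
--     for i, filename in enumerate(paired_files):
--         partition_idx = i % num_partitions
--         partitions[partition_idx].append(filename)
--
--     return partitions
-- ===== SOURCE B (Python) =====
-- def create_partitions(paired_files, num_partitions):
--     """Distribute files round-robin across partitions, by strided slices."""
--     if num_partitions <= 0:
--         raise ValueError("Number of partitions must be positive")
--     if num_partitions > len(paired_files):
--         raise ValueError(f"Cannot create {num_partitions} partitions from {len(paired_files)} file pairs")
--     return [paired_files[j::num_partitions] for j in range(num_partitions)]
-- ===== Notes on version B (the rewrite author's own statement) =====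
-- stated objective: idiomatic
-- what changed: Instead of iterating over files and appending each to its modulo-selected partition, B iterates over partition indices and extracts each partition in one strided slice paired_files[j::num_partitions].
import Mathlib
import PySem

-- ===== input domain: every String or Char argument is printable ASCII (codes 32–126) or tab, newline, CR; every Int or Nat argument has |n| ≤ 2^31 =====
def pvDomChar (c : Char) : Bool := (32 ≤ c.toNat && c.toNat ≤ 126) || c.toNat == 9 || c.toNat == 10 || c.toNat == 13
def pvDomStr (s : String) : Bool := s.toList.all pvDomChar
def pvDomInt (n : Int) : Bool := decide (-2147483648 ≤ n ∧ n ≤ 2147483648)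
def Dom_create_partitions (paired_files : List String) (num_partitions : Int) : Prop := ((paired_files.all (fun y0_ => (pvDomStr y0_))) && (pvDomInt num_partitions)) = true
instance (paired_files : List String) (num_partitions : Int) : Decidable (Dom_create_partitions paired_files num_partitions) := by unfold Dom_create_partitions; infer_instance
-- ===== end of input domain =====

-- ===== PORT A =====
-- A loops over files, appending each to the partition selected by index mod num_partitions.
-- B builds each partition directly as the strided slice paired_files[j::num_partitions] (idiomatic decomposition).
-- On num_partitions <= 0 or num_partitions > len(paired_files) both Pythons raise ValueError (excluded by Pre_);
-- the ports return [] there.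
def create_partitions (paired_files : List String) (num_partitions : Int) : List (List String) :=
  if num_partitions ≤ 0 then []        -- Python: raise ValueError (outside Pre_)
  else if num_partitions > (paired_files.length : Int) then []  -- Python: raise ValueError (outside Pre_)
  else
    let partitions : List (List String) := List.replicate num_partitions.toNat []
    -- for i, filename in enumerate(paired_files): partitions[i % num_partitions].append(filename)
    -- the index i % num_partitions is nonnegative here, so .toNat is exact
    (PySem.List.enumerate paired_files).foldl
      (fun parts iv =>
        let partition_idx := PySem.Int.mod iv.1 num_partitions
        parts.modify partition_idx.toNat (fun p => p ++ [iv.2]))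
      partitions

-- ===== PORT B =====
def create_partitions_alt (paired_files : List String) (num_partitions : Int) : List (List String) :=
  if num_partitions ≤ 0 then []        -- Python: raise ValueError (outside Pre_)
  else if num_partitions > (paired_files.length : Int) then []  -- Python: raise ValueError (outside Pre_)
  else
    -- [paired_files[j::num_partitions] for j in range(num_partitions)]
    -- slice? is none only for step = 0, impossible here, so .getD [] is exact
    (PySem.List.pyRange 0 num_partitions 1).map
      (fun j => (PySem.List.slice? paired_files (some j) none num_partitions).getD [])

-- ===== PRECONDITION & SPEC =====
-- Pre_: exactly the inputs where A returns normally (A raises ValueError on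
-- num_partitions <= 0 and on num_partitions > len(paired_files)).
def Pre_create_partitions (paired_files : List String) (num_partitions : Int) : Prop :=
  0 < num_partitions ∧ num_partitions ≤ (paired_files.length : Int)
instance (paired_files : List String) (num_partitions : Int) : Decidable (Pre_create_partitions paired_files num_partitions) := by unfold Pre_create_partitions; infer_instance
def pvWitness_create_partitions : List String × Int := (["a", "b", "c"], 2)

def Spec_create_partitions (paired_files : List String) (num_partitions : Int) (out : List (List String)) : Prop := out = create_partitions_alt paired_files num_partitions
instance (paired_files : List String) (num_partitions : Int) (out : List (List String)) : Decidable (Spec_create_partitions paired_files num_partitions out) := by unfold Spec_create_partitions; infer_instance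

-- ===== CLAIM (what is proved, stated in full; the proofs are below) =====
def Claim_equal_create_partitions : Prop := ∀ (paired_files : List String) (num_partitions : Int), Dom_create_partitions paired_files num_partitions → Pre_create_partitions paired_files num_partitions → Spec_create_partitions paired_files num_partitions (create_partitions paired_files num_partitions)

-- ===== LEMMAS AND PROOFS =====

-- the j-th strided slice, as a closed form over Nat indices
def stride (xs : List String) (j N : Nat) : List String :=
  (List.range ((xs.length - j + N - 1) / N)).filterMap (fun k => xs[j + N * k]?)

theorem enumerate_append_singleton (xs : List String) (x : String) (s : Int) :
    PySem.List.enumerate (xs ++ [x]) s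
      = PySem.List.enumerate xs s ++ [(s + xs.length, x)] := by
  induction xs generalizing s with
  | nil => simp [PySem.List.enumerate_cons, PySem.List.enumerate_nil]
  | cons y ys ih =>
      simp only [List.cons_append, PySem.List.enumerate_cons, ih (s + 1), List.length_cons]
      have hc : ((ys.length + 1 : Nat) : Int) = (ys.length : Int) + 1 := by push_cast; ring
      have ha : s + 1 + (ys.length : Int) = s + ((ys.length : Int) + 1) := by ring
      rw [hc, ha]

theorem stride_nil (j N : Nat) (hN : 0 < N) : stride [] j N = [] := by
  unfold stride
  have : ([] : List String).length - j + N - 1 = N - 1 := by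
    simp only [List.length_nil]; omega
  rw [this, Nat.div_eq_of_lt (by omega)]
  simp

theorem stride_index_lt (L j N k : Nat) (hN : 0 < N)
    (hk : k < (L - j + N - 1) / N) : j + N * k < L := by
  have h1 : (k + 1) * N ≤ L - j + N - 1 :=
    (Nat.le_div_iff_mul_le hN).mp (Nat.succ_le_of_lt hk)
  have h2 : (k + 1) * N = N * k + N := by ring
  rw [h2] at h1
  omega

theorem stride_snoc (xs : List String) (x : String) (j N : Nat)
    (hN : 0 < N) (hj : j < N) :
    stride (xs ++ [x]) j N
      = stride xs j N ++ (if xs.length % N = j then [x] else []) := by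
  unfold stride
  rw [List.length_append, List.length_cons, List.length_nil]
  set L := xs.length with hL
  rcases Nat.lt_or_ge L j with hjL | hjL
  · -- j beyond the list: both strides are empty and L % N = L ≠ j
    have e1 : L + 0 + 1 - j + N - 1 = N - 1 := by omega
    have e2 : L - j + N - 1 = N - 1 := by omega
    have hmod : L % N = L := Nat.mod_eq_of_lt (by omega)
    rw [e1, e2, Nat.div_eq_of_lt (by omega), if_neg (by omega)]
    simp
  · obtain ⟨q, r, hdr, hrN⟩ : ∃ q r, L - j = N * q + r ∧ r < N :=
      ⟨(L - j) / N, (L - j) % N, ((Nat.div_add_mod _ _).symm), Nat.mod_lt _ hN⟩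
    have hmodL : L % N = (j + r) % N := by
      have hLe : L = j + r + N * q := by omega
      rw [hLe, Nat.add_mul_mod_self_left]
    have hC : (L - j + N - 1) / N = q + (r + N - 1) / N := by
      have he : L - j + N - 1 = N * q + (r + N - 1) := by omega
      rw [he, Nat.mul_add_div hN]
    have hC1 : (L + 0 + 1 - j + N - 1) / N = q + (r + N) / N := by
      have he : L + 0 + 1 - j + N - 1 = N * q + (r + N) := by omega
      rw [he, Nat.mul_add_div hN]
    by_cases hr : r = 0
    · have hmod : L % N = j := by
        rw [hmodL, hr, Nat.add_zero, Nat.mod_eq_of_lt hj]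
      have hCq : (L - j + N - 1) / N = q := by
        rw [hC, hr, Nat.div_eq_of_lt (by omega), Nat.add_zero]
      have hC1q : (L + 0 + 1 - j + N - 1) / N = q + 1 := by
        have he : r + N = N := by omega
        rw [hC1, he, Nat.div_self hN]
      rw [hCq, hC1q, if_pos hmod, List.range_succ, List.filterMap_append]
      congr 1
      · apply List.filterMap_congr
        intro k hk
        rw [List.mem_range] at hk
        exact List.getElem?_append_left (stride_index_lt L j N k hN (hCq.symm ▸ hk))
      · have hidx : j + N * q = L := by omega
        simp [hidx, ← hL]
    · have hmodne : L % N ≠ j := by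
        rw [hmodL]
        rcases Nat.lt_or_ge (j + r) N with h | h
        · rw [Nat.mod_eq_of_lt h]; omega
        · rw [Nat.mod_eq_sub_mod h, Nat.mod_eq_of_lt (by omega)]; omega
      have hd1 : (r + N - 1) / N = 1 := Nat.div_eq_of_lt_le (by omega) (by omega)
      have hd2 : (r + N) / N = 1 := Nat.div_eq_of_lt_le (by omega) (by omega)
      have hCq : (L - j + N - 1) / N = q + 1 := by rw [hC, hd1]
      have hC1q : (L + 0 + 1 - j + N - 1) / N = q + 1 := by rw [hC1, hd2]
      rw [hCq, hC1q, if_neg hmodne, List.append_nil]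
      apply List.filterMap_congr
      intro k hk
      rw [List.mem_range] at hk
      exact List.getElem?_append_left (stride_index_lt L j N k hN (hCq.symm ▸ hk))

theorem slice_eq_stride (xs : List String) (j N : Nat) (hN : 0 < N)
    (hj : j < xs.length) :
    PySem.List.slice? xs (some (j : Int)) none (N : Int) = some (stride xs j N) := by
  have h0 : ¬((N : Int) = 0) := by omega
  have hneg : ¬((N : Int) < 0) := by omega
  have hjneg : ¬((j : Int) < 0) := by omega
  have hpos : (0 : Int) < (N : Int) := by omega
  have hmin : min (j : Int) (xs.length : Int) = (j : Int) := min_eq_left (by omega)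
  have hlt : (j : Int) < (xs.length : Int) := by omega
  simp only [PySem.List.slice?, PySem.List.sliceIndices, h0, hneg, hjneg, hpos, hmin, hlt,
    if_false]
  have hcount : (((xs.length : Int) - (j : Int) + (N : Int) - 1) / (N : Int)).toNat
      = (xs.length - j + N - 1) / N := by
    have he : (xs.length : Int) - (j : Int) + (N : Int) - 1
        = ((xs.length - j + N - 1 : Nat) : Int) := by omega
    rw [he, ← Int.natCast_div, Int.toNat_natCast]
  rw [hcount]
  simp only [if_true]
  rfl

theorem loop_eq_map_stride (N : Nat) (hN : 0 < N) (xs : List String) :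
    (PySem.List.enumerate xs).foldl
      (fun parts iv =>
        let partition_idx := PySem.Int.mod iv.1 (N : Int)
        parts.modify partition_idx.toNat (fun p => p ++ [iv.2]))
      (List.replicate N [])
      = (List.range N).map (fun j => stride xs j N) := by
  induction xs using List.reverseRecOn with
  | nil =>
      simp only [PySem.List.enumerate_nil, List.foldl_nil]
      apply List.ext_getElem (by simp)
      intro i h1 h2
      simp [stride_nil _ _ hN]
  | append_singleton ys y ih =>
      rw [enumerate_append_singleton ys y 0, List.foldl_append, ih]
      simp only [List.foldl_cons, List.foldl_nil, zero_add]
      have hmod : (PySem.Int.mod ((ys.length : Int)) ((N : Nat) : Int)).toNat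
          = ys.length % N := by
        rw [PySem.Int.mod_natCast, Int.toNat_natCast]
      simp only [hmod]
      apply List.ext_getElem (by simp)
      intro i h1 h2
      have hiN : i < N := by simpa using h2
      simp only [List.getElem_modify, List.getElem_map, List.getElem_range]
      rw [stride_snoc ys y i N hN hiN]
      by_cases hcase : ys.length % N = i
      · rw [if_pos hcase, if_pos hcase]
      · rw [if_neg hcase, if_neg hcase, List.append_nil]

-- ===== VERDICT (by name: the statement is the Claim_ definition above) =====
theorem create_partitions_spec : Claim_equal_create_partitions := by
  intro xs n _ hpre
  obtain ⟨h0, hle⟩ := hpre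
  unfold Spec_create_partitions create_partitions create_partitions_alt
  rw [if_neg (by omega), if_neg (by omega), if_neg (by omega), if_neg (by omega)]
  have hn : n = ((n.toNat : Nat) : Int) := by omega
  set N := n.toNat with hNdef
  have hNpos : 0 < N := by omega
  rw [hn, loop_eq_map_stride N hNpos xs, PySem.List.pyRange_zero_nat, List.map_map]
  refine List.map_congr_left ?_
  intro j hj
  simp only [List.mem_range] at hj
  simp only [Function.comp]
  rw [slice_eq_stride xs j N hNpos (by omega)]
  rfl
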